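-- pv_equiv track=rewrite | github.com/tomihq/tda | codes/divide_and_conquer/mas_a_la_izquierda.py | mas_a_la_izquierda
-- ===== SOURCE A (Python) =====
-- def mas_a_la_izquierda(arr):
--     if len(arr) == 1:
--         return True
--
--     mitad = len(arr) // 2
--     izq = arr[0:mitad]
--     der = arr[mitad:]
--
--     suma_izq = sum(izq)
--     suma_der = sum(der)
--
--     if suma_izq <= suma_der:
--         return False
--
--     return mas_a_la_izquierda(izq) and mas_a_la_izquierda(der)
-- ===== SOURCE B (Python) =====
-- def mas_a_la_izquierda(arr):
--     # One prefix-sum pass, then index-based recursion over (lo, hi); half sums are prefix differences.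
--     pref = [0]
--     for x in arr:
--         pref.append(pref[-1] + x)
--
--     def check(lo, hi):
--         n = hi - lo
--         if n <= 1:
--             return n == 1
--         mid = lo + n // 2
--         if pref[mid] - pref[lo] <= pref[hi] - pref[mid]:
--             return False
--         return check(lo, mid) and check(mid, hi)
--
--     return check(0, len(arr))
-- ===== Notes on version B (the rewrite author's own statement) =====
-- stated objective: alternative
-- what changed: Replaced A's recursion that slices the list and re-sums both halves at every level by a single prefix-sum pass followed by an index-based recursion whose half sums are prefix differences; fewer sum operations asymptotically, but CPython's C-level sum() keeps A as fast in practice.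
import Mathlib
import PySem

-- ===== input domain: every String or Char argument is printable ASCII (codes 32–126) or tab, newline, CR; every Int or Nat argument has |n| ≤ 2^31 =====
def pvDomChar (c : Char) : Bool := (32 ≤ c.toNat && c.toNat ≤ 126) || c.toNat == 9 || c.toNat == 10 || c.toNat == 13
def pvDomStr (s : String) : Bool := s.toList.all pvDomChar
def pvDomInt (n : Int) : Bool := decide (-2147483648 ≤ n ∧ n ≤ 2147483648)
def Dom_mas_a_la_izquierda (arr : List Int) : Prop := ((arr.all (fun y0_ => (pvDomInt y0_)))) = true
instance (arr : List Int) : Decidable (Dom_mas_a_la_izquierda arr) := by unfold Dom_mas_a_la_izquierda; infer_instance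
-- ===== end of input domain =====

-- B replaces A's repeated slicing-and-summing at every recursion level by one prefix-sum
-- pass and an index-based recursion whose half sums are prefix differences (objective: alternative).

-- ===== PORT A =====
def mas_a_la_izquierda (arr : List Int) : Bool :=
  if _h1 : arr.length = 1 then true
  else
    let mitad := arr.length / 2
    let izq := PySem.List.slice arr (some 0) (some (mitad : Int))
    let der := PySem.List.slice arr (some (mitad : Int)) none
    if _h2 : izq.sum ≤ der.sum then false
    else mas_a_la_izquierda izq && mas_a_la_izquierda der
termination_by arr.length
decreasing_by
  all_goals
    rcases Nat.eq_zero_or_pos arr.length with h0 | h0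
  all_goals
    simp only [PySem.List.slice_zero_start, PySem.List.slice_to_natCast,
      PySem.List.slice_from_natCast, List.length_take, List.length_drop]
  · simp only [izq, der, List.eq_nil_of_length_eq_zero h0, PySem.List.slice] at _h2
    simp at _h2
  · omega
  · simp only [izq, der, List.eq_nil_of_length_eq_zero h0, PySem.List.slice] at _h2
    simp at _h2
  · omega

-- ===== PORT B =====
-- the Python loop 'pref = [0]; for x in arr: pref.append(pref[-1] + x)'
def pvBuildPref (arr : List Int) : List Int :=
  arr.foldl (fun (p : List Int) x => p ++ [PySem.List.pyGetD p (-1) 0 + x]) [0]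

-- the inner recursion 'check(lo, hi)' of Source B over indices into pref
-- (pref[i] indices are always in range, so pyGetD's default is never used)
def pvCheck (pref : List Int) (lo hi : Nat) : Bool :=
  let n := hi - lo
  if n ≤ 1 then n == 1
  else
    let mid := lo + n / 2
    if PySem.List.pyGetD pref (mid : Int) 0 - PySem.List.pyGetD pref (lo : Int) 0 ≤
        PySem.List.pyGetD pref (hi : Int) 0 - PySem.List.pyGetD pref (mid : Int) 0 then false
    else pvCheck pref lo mid && pvCheck pref mid hi
termination_by hi - lo
decreasing_by all_goals omega

def mas_a_la_izquierda_alt (arr : List Int) : Bool :=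
  pvCheck (pvBuildPref arr) 0 arr.length

-- ===== PRECONDITION & SPEC =====
def Spec_mas_a_la_izquierda (arr : List Int) (out : Bool) : Prop := out = mas_a_la_izquierda_alt arr
instance (arr : List Int) (out : Bool) : Decidable (Spec_mas_a_la_izquierda arr out) := by unfold Spec_mas_a_la_izquierda; infer_instance

-- ===== CLAIM (what is proved, stated in full; the proofs are below) =====
def Claim_equal_mas_a_la_izquierda : Prop := ∀ (arr : List Int), Dom_mas_a_la_izquierda arr → Spec_mas_a_la_izquierda arr (mas_a_la_izquierda arr)

-- ===== LEMMAS AND PROOFS =====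

lemma pvGetLast_append (p : List Int) (a : Int) :
    PySem.List.pyGetD (p ++ [a]) (-1) 0 = a := by
  simp [PySem.List.pyGetD, PySem.List.pyGet?, PySem.List.pyIdx?]

lemma pvBuildPref_aux (arr : List Int) (p : List Int) (s : Int)
    (hp : PySem.List.pyGetD p (-1) 0 = s) :
    arr.foldl (fun (p : List Int) x => p ++ [PySem.List.pyGetD p (-1) 0 + x]) p
      = p ++ (List.range arr.length).map (fun i => s + (arr.take (i + 1)).sum) := by
  induction arr generalizing p s with
  | nil => simp
  | cons x xs ih =>
    simp only [List.foldl_cons, hp]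
    rw [ih (p ++ [s + x]) (s + x) (pvGetLast_append p (s + x))]
    simp only [List.length_cons, List.range_succ_eq_map, List.map_cons, List.map_map]
    simp [List.append_assoc, Function.comp_def, add_assoc]

lemma pvBuildPref_eq (arr : List Int) :
    pvBuildPref arr = 0 :: (List.range arr.length).map (fun i => (arr.take (i + 1)).sum) := by
  unfold pvBuildPref
  rw [pvBuildPref_aux arr [0] 0 (by decide)]
  simp

lemma pvBuildPref_getD (arr : List Int) (i : Nat) (hi : i ≤ arr.length) :
    PySem.List.pyGetD (pvBuildPref arr) (i : Int) 0 = (arr.take i).sum := by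
  rw [PySem.List.pyGetD_natCast, pvBuildPref_eq]
  cases i with
  | zero => simp
  | succ j =>
    have hj : j < arr.length := by omega
    simp [List.getD_eq_getElem?_getD, hj]

-- sum of a middle segment as a difference of two prefix sums
lemma seg_sum (arr : List Int) (a b : Nat) (hab : a ≤ b) :
    ((arr.drop a).take (b - a)).sum = (arr.take b).sum - (arr.take a).sum := by
  have : arr.take b = arr.take a ++ (arr.drop a).take (b - a) := by
    rw [← List.take_add]
    congr 1
    omega
  rw [this, List.sum_append]
  ring

-- the core correspondence: pvCheck on [lo, hi) computes A on the segment arr[lo:hi]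
theorem pvCheck_eq_A (arr : List Int) (lo hi : Nat) (hlo : lo ≤ hi) (hhi : hi ≤ arr.length) :
    pvCheck (pvBuildPref arr) lo hi = mas_a_la_izquierda ((arr.drop lo).take (hi - lo)) := by
  have hlen : ((arr.drop lo).take (hi - lo)).length = hi - lo := by
    simp [List.length_take, List.length_drop]; omega
  rw [pvCheck, mas_a_la_izquierda]
  dsimp only
  by_cases h1 : hi - lo ≤ 1
  · by_cases h0 : hi - lo = 0
    · simp only [h0]
      norm_num [PySem.List.slice]
    · have h1' : hi - lo = 1 := by omega
      rw [if_pos h1, dif_pos (by rw [hlen, h1'])]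
      simp [h1']
  · rw [if_neg h1, dif_neg (by omega)]
    have hmid : lo + (hi - lo) / 2 ≤ hi := by omega
    have hmidlo : lo ≤ lo + (hi - lo) / 2 := by omega
    -- A's slices of the segment are segments of arr
    have hizq : PySem.List.slice ((arr.drop lo).take (hi - lo)) (some 0)
          (some ((((arr.drop lo).take (hi - lo)).length / 2 : Nat) : Int))
        = (arr.drop lo).take ((lo + (hi - lo) / 2) - lo) := by
      rw [PySem.List.slice_zero_start, PySem.List.slice_to_natCast, List.take_take, hlen]
      congr 1
      omega
    have hder : PySem.List.slice ((arr.drop lo).take (hi - lo))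
          (some ((((arr.drop lo).take (hi - lo)).length / 2 : Nat) : Int)) none
        = (arr.drop (lo + (hi - lo) / 2)).take (hi - (lo + (hi - lo) / 2)) := by
      rw [PySem.List.slice_from_natCast, List.drop_take, List.drop_drop, hlen]
      congr 1; omega
    rw [hizq, hder]
    -- half sums via prefix differences
    have e1 : PySem.List.pyGetD (pvBuildPref arr) ((lo + (hi - lo) / 2 : Nat) : Int) 0
          - PySem.List.pyGetD (pvBuildPref arr) (lo : Int) 0
        = ((arr.drop lo).take ((lo + (hi - lo) / 2) - lo)).sum := by
      rw [pvBuildPref_getD _ _ (by omega), pvBuildPref_getD _ _ (by omega),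
        seg_sum arr lo (lo + (hi - lo) / 2) hmidlo]
    have e2 : PySem.List.pyGetD (pvBuildPref arr) (hi : Int) 0
          - PySem.List.pyGetD (pvBuildPref arr) ((lo + (hi - lo) / 2 : Nat) : Int) 0
        = ((arr.drop (lo + (hi - lo) / 2)).take (hi - (lo + (hi - lo) / 2))).sum := by
      rw [pvBuildPref_getD _ _ hhi, pvBuildPref_getD _ _ (by omega),
        seg_sum arr (lo + (hi - lo) / 2) hi hmid]
    rw [e1, e2]
    by_cases hc : ((arr.drop lo).take ((lo + (hi - lo) / 2) - lo)).sum
        ≤ ((arr.drop (lo + (hi - lo) / 2)).take (hi - (lo + (hi - lo) / 2))).sum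
    · rw [if_pos hc, dif_pos hc]
    · rw [if_neg hc, dif_neg hc]
      have r1 := pvCheck_eq_A arr lo (lo + (hi - lo) / 2) hmidlo (by omega)
      have r2 := pvCheck_eq_A arr (lo + (hi - lo) / 2) hi hmid hhi
      rw [r1, r2]
termination_by hi - lo
decreasing_by all_goals omega

-- ===== VERDICT (by name: the statement is the Claim_ definition above) =====
theorem mas_a_la_izquierda_spec : Claim_equal_mas_a_la_izquierda := by
  intro arr _
  unfold Spec_mas_a_la_izquierda mas_a_la_izquierda_alt
  rw [pvCheck_eq_A arr 0 arr.length (by omega) le_rfl]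
  simp
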